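-- pv_equiv track=rewrite | github.com/frederikheld/AdventOfCode2019 | challenges/day_04/lib/password_solver.py | check_two_adjacent_are_same
-- ===== SOURCE A (Python) =====
-- def check_two_adjacent_are_same(number, allow_large_groups=True):
--     stringified_number = str(number)
--
--     for i, pos in enumerate(stringified_number):
--
--         if i < len(stringified_number) - 1 and stringified_number[i] == stringified_number[i+1]:
--
--             if allow_large_groups or len(stringified_number) == 2:
--                 return True
--
--             # length > 3, couple is not touching the boundaries: 12334
--             if i < len(stringified_number) - 2 and i > 0:
--                 if stringified_number[i] == stringified_number[i+1]:
--                     if stringified_number[i] != stringified_number[i+2]: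
--                         if stringified_number[i] != stringified_number[i-1]:
--                             return True
--
--             # length >= 3, fist 2 digits are a couple: 112
--             if i == 0 and stringified_number[i] == stringified_number[i+1]:
--                 if stringified_number[i] != stringified_number[i+2]:
--                     return True
--
--             # length >= 3, last 2 digits are a couple: 122
--             if i == len(stringified_number) - 2 and stringified_number[i] == stringified_number[i+1]:
--                 if stringified_number[i] != stringified_number[i-1]:
--                     return True
--
--     return False
-- ===== SOURCE B (Python) =====
-- def check_two_adjacent_are_same(number, allow_large_groups=True):
--     # One pass over str(number) tracking the current run length; a completed
--     # run qualifies if its length is >= 2 (allow_large_groups) / exactly 2.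
--     s = str(number)
--     prev = None
--     run = 0
--     found = False
--     for ch in s:
--         if ch == prev:
--             run += 1
--         else:
--             found = found or (run >= 2 if allow_large_groups else run == 2)
--             prev = ch
--             run = 1
--     return found or (run >= 2 if allow_large_groups else run == 2)
-- ===== Notes on version B (the rewrite author's own statement) =====
-- stated objective: simpler
-- what changed: A's positional scan with four tangled boundary-case branches (first pair, middle pair, last pair, length-2 string) is replaced by a single run-length pass that tracks the current run of equal digits and tests each completed run for length >= 2 (allow_large_groups) or exactly 2.
import Mathlib
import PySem

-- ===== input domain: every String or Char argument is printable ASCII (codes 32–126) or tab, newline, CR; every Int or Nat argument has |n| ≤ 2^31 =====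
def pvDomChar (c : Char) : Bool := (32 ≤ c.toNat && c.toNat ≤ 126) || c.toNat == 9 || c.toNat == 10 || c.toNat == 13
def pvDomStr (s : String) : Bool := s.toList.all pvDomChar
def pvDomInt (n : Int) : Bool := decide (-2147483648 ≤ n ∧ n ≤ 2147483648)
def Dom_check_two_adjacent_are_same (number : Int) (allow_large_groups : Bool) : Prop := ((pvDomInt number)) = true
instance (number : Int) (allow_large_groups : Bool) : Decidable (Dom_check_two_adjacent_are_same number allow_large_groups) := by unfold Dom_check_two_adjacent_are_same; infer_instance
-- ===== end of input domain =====

-- B replaces A's positional boundary-case scan by a single run-length pass over the digits (same cost, simpler).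

-- ===== PORT A =====
-- index loop of A's `for i, pos in enumerate(stringified_number)`; every Python
-- index evaluated is in range (short-circuit guards), so List.getD is exact there.
def pvAGo (s : List Char) (allow : Bool) (i : Nat) : Bool :=
  if i < s.length then
    if i < s.length - 1 && (s.getD i ' ' == s.getD (i+1) ' ') then
      if allow || s.length == 2 then true
      else if (decide (i < s.length - 2) && decide (0 < i)) &&
              (s.getD i ' ' == s.getD (i+1) ' ') &&
              (s.getD i ' ' != s.getD (i+2) ' ') &&
              (s.getD i ' ' != s.getD (i-1) ' ') then true
      else if (i == 0) && (s.getD i ' ' == s.getD (i+1) ' ') &&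
              (s.getD i ' ' != s.getD (i+2) ' ') then true
      else if (i == s.length - 2) && (s.getD i ' ' == s.getD (i+1) ' ') &&
              (s.getD i ' ' != s.getD (i-1) ' ') then true
      else pvAGo s allow (i+1)
    else pvAGo s allow (i+1)
  else false
termination_by s.length - i

def check_two_adjacent_are_same (number : Int) (allow_large_groups : Bool) : Bool :=
  pvAGo (PySem.Int.toStr number).toList allow_large_groups 0

-- ===== PORT B =====
-- B's loop state (prev, run, found); the qualifying test is
-- `run >= 2 if allow_large_groups else run == 2`, as in Source B.
def pvBStep (allow : Bool) (st : Option Char × Nat × Bool) (ch : Char) : Option Char × Nat × Bool :=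
  if some ch == st.1 then (st.1, st.2.1 + 1, st.2.2)
  else (some ch, 1, st.2.2 || (if allow then decide (2 ≤ st.2.1) else st.2.1 == 2))

def check_two_adjacent_are_same_alt (number : Int) (allow_large_groups : Bool) : Bool :=
  let st := (PySem.Int.toStr number).toList.foldl (pvBStep allow_large_groups) (none, 0, false)
  st.2.2 || (if allow_large_groups then decide (2 ≤ st.2.1) else st.2.1 == 2)

-- ===== PRECONDITION & SPEC =====
def Spec_check_two_adjacent_are_same (number : Int) (allow_large_groups : Bool) (out : Bool) : Prop := out = check_two_adjacent_are_same_alt number allow_large_groups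
instance (number : Int) (allow_large_groups : Bool) (out : Bool) : Decidable (Spec_check_two_adjacent_are_same number allow_large_groups out) := by unfold Spec_check_two_adjacent_are_same; infer_instance

-- ===== CLAIM (what is proved, stated in full; the proofs are below) =====
def Claim_equal_check_two_adjacent_are_same : Prop := ∀ (number : Int) (allow_large_groups : Bool), Dom_check_two_adjacent_are_same number allow_large_groups → Spec_check_two_adjacent_are_same number allow_large_groups (check_two_adjacent_are_same number allow_large_groups)

-- ===== LEMMAS AND PROOFS =====

-- does a completed run of length r qualify?
def pvQual (allow : Bool) (r : Nat) : Bool := if allow then decide (2 ≤ r) else r == 2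

-- positional reformulation of A's loop: previous char + remaining suffix
def pvAPos (allow : Bool) (p : Option Char) : List Char → Bool
  | a :: b :: t => if a == b && (allow || ((some a != p) && (t.head? != some a))) then true
                   else pvAPos allow (some a) (b :: t)
  | _ => false

-- length of the maximal prefix of u consisting of c
def pvLead (c : Char) : List Char → Nat
  | [] => 0
  | a :: t => if a == c then pvLead c t + 1 else 0

theorem pvAPos_head_new (allow : Bool) (p : Option Char) (a : Char) (t : List Char)
    (hp : p ≠ some a) :
    pvAPos allow p (a :: t) = (pvQual allow (1 + pvLead a t) || pvAPos allow (some a) t) := by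
  match t with
  | [] => cases allow <;> simp [pvAPos, pvQual, pvLead]
  | b :: t' =>
    by_cases hab : a = b
    · subst hab
      cases allow with
      | true => simp [pvAPos, pvLead, pvQual]; left; omega
      | false =>
        match t' with
        | [] => simp [pvAPos, pvLead, pvQual]; exact fun h => absurd h.symm hp
        | c :: t'' =>
          by_cases hac : c = a
          · subst hac
            simp [pvAPos, pvLead, pvQual]
            intro h; exact absurd h (by omega)
          · simp [pvAPos, pvLead, pvQual, hac]
            exact Or.inl (fun h => hp h.symm)
    · simp [pvAPos, pvLead, pvQual, hab]
      intro h; exfalso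
      have hba : ¬ b = a := fun hh => hab hh.symm
      cases allow <;> simp [hba] at h

theorem pvFold_spec (allow : Bool) (u : List Char) : ∀ (c : Char) (r : Nat) (v : Bool),
    (letI st := u.foldl (pvBStep allow) (some c, r, v)
     st.2.2 || pvQual allow st.2.1)
    = (v || pvQual allow (r + pvLead c u) || pvAPos allow (some c) u) := by
  induction u with
  | nil => intro c r v; simp [pvLead, pvAPos]
  | cons a u' ih =>
    intro c r v
    by_cases hac : a = c
    · subst hac
      rw [show (a :: u').foldl (pvBStep allow) (some a, r, v) = u'.foldl (pvBStep allow) (some a, r+1, v) from by simp [pvBStep]]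
      rw [ih a (r+1) v]
      match u' with
      | [] => simp [pvLead, pvAPos]
      | b :: t =>
        by_cases hba : b = a
        · subst hba
          cases allow with
          | true =>
            simp [pvAPos, pvLead, pvQual]
            left; omega
          | false =>
            simp [pvAPos, pvLead, pvQual]
            rw [show r + (pvLead b t + 1 + 1) = r + 1 + (pvLead b t + 1) from by omega]
        · simp [pvAPos, pvLead, pvQual, hba]
          simp [decide_eq_false (fun h : a = b => hba h.symm)]
    · rw [show (a :: u').foldl (pvBStep allow) (some c, r, v) = u'.foldl (pvBStep allow) (some a, 1, v || (if allow then decide (2 ≤ r) else r == 2)) from by simp [pvBStep, fun h : a = c => hac h]]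
      rw [ih a 1 (v || (if allow then decide (2 ≤ r) else r == 2))]
      rw [pvAPos_head_new allow (some c) a u' (fun h => hac (Option.some.inj h).symm)]
      simp [pvLead, pvQual, fun h : a = c => hac h, Bool.or_assoc]

theorem pvB_eq_pos (allow : Bool) (s : List Char) :
    (letI st := s.foldl (pvBStep allow) (none, 0, false)
     st.2.2 || pvQual allow st.2.1) = pvAPos allow none s := by
  match s with
  | [] => cases allow <;> simp [pvQual, pvAPos]
  | a :: u =>
    rw [show (a :: u).foldl (pvBStep allow) (none, 0, false)
          = u.foldl (pvBStep allow) (some a, 1, false || (if allow then decide (2 ≤ (0:Nat)) else (0:Nat) == 2)) from by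
        simp [pvBStep]]
    rw [pvFold_spec allow u a 1 (false || (if allow then decide (2 ≤ (0:Nat)) else (0:Nat) == 2))]
    rw [pvAPos_head_new allow none a u (by simp)]
    cases allow <;> simp [pvQual]
theorem pvA_eq_pos (s : List Char) (allow : Bool) : ∀ (k i : Nat), s.length - i ≤ k →
    pvAGo s allow i = pvAPos allow (if i = 0 then none else (s.drop (i-1)).head?) (s.drop i) := by
  intro k
  induction k with
  | zero =>
    intro i hi
    have hle : s.length ≤ i := by omega
    rw [pvAGo, if_neg (show ¬ i < s.length by omega), List.drop_eq_nil_of_le hle]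
    simp [pvAPos]
  | succ k ih =>
    intro i hi
    by_cases hlt : i < s.length
    · have hdropi : s.drop i = s[i] :: s.drop (i+1) := List.drop_eq_getElem_cons hlt
      have hgd0 : s.getD i ' ' = s[i] := List.getD_eq_getElem s ' ' hlt
      have hprev1 : (if i + 1 = 0 then none else (s.drop (i+1-1)).head?) = some s[i] := by
        rw [if_neg (Nat.succ_ne_zero i), Nat.add_sub_cancel, hdropi]; rfl
      by_cases h1 : i + 1 < s.length
      · have hdropi1 : s.drop (i+1) = s[i+1] :: s.drop (i+2) := List.drop_eq_getElem_cons h1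
        have hgd1 : s.getD (i+1) ' ' = s[i+1] := List.getD_eq_getElem s ' ' h1
        have hih : pvAGo s allow (i+1) = pvAPos allow (some s[i]) (s[i+1] :: s.drop (i+2)) := by
          rw [ih (i+1) (by omega), hprev1, hdropi1]
        by_cases hab : s[i] = s[i+1]
        · -- adjacent equal pair at position i
          have hc1 : (decide (i < s.length - 1) && (s.getD i ' ' == s.getD (i+1) ' ')) = true := by
            rw [hgd0, hgd1]
            simp only [Bool.and_eq_true, decide_eq_true_eq, beq_iff_eq]
            exact ⟨by omega, hab⟩
          by_cases hallow : allow = true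
          · subst hallow
            rw [pvAGo, if_pos hlt, if_pos hc1, if_pos (show (true || (s.length == 2)) = true by simp)]
            rw [hdropi, hdropi1, pvAPos,
                if_pos (show ((s[i] == s[i+1]) && (true || ((some s[i] != if i = 0 then none else (s.drop (i-1)).head?) && ((s.drop (i+2)).head? != some s[i])))) = true by
                  simp only [Bool.true_or, Bool.and_true, beq_iff_eq]
                  exact hab)]
          · have hq : allow = false := by cases allow with | false => rfl | true => exact absurd rfl hallow
            subst hq
            by_cases hlen2 : s.length = 2
            · have hi0 : i = 0 := by omega
              subst hi0
              have ht : s.drop 2 = [] := List.drop_eq_nil_of_le (by omega)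
              rw [pvAGo, if_pos hlt, if_pos hc1, if_pos (show (false || (s.length == 2)) = true by simp [hlen2])]
              rw [if_pos rfl, hdropi, hdropi1, ht, pvAPos,
                  if_pos (show ((s[0] == s[0+1]) && (false || ((some s[0] != none) && (([] : List Char).head? != some s[0])))) = true by
                    simp only [Bool.and_eq_true, Bool.or_eq_true, bne_iff_ne, ne_eq, beq_iff_eq, List.head?_nil]
                    exact ⟨hab, Or.inr ⟨by simp, by simp⟩⟩)]
            · have hlen3 : 3 ≤ s.length := by omega
              have hh : (s.drop (i+2)).head? = s[i+2]? := by
                by_cases h2 : i + 2 < s.length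
                · rw [List.drop_eq_getElem_cons h2, List.getElem?_eq_getElem h2]; rfl
                · rw [List.drop_eq_nil_of_le (by omega), List.getElem?_eq_none (by omega)]; rfl
              rw [pvAGo, if_pos hlt, if_pos hc1,
                  if_neg (show ¬ (false || (s.length == 2)) = true by simp [hlen2])]
              rw [hdropi, hdropi1, pvAPos]
              by_cases hi0 : i = 0
              · subst hi0
                rw [show (if (0:Nat) = 0 then (none : Option Char) else (s.drop (0-1)).head?) = none from if_pos rfl]
                have h2 : 0 + 2 < s.length := by omega
                have hgd2 : s.getD (0+2) ' ' = s[0+2] := List.getD_eq_getElem s ' ' h2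
                have hg2 : s[0+2]? = some s[0+2] := List.getElem?_eq_getElem h2
                rw [if_neg (show ¬ ((decide (0 < s.length - 2) && decide (0 < 0)) &&
                      (s.getD 0 ' ' == s.getD (0+1) ' ') &&
                      (s.getD 0 ' ' != s.getD (0+2) ' ') &&
                      (s.getD 0 ' ' != s.getD (0-1) ' ')) = true by simp)]
                by_cases hx : s[0] = s[0+2]
                · rw [if_neg (show ¬ ((0 == 0) && (s.getD 0 ' ' == s.getD (0+1) ' ') &&
                        (s.getD 0 ' ' != s.getD (0+2) ' ')) = true by
                      rw [hgd0, hgd2]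
                      simp only [Bool.and_eq_true, bne_iff_ne, ne_eq]
                      rintro ⟨-, h3⟩
                      exact h3 hx),
                      if_neg (show ¬ ((0 == s.length - 2) && (s.getD 0 ' ' == s.getD (0+1) ' ') &&
                        (s.getD 0 ' ' != s.getD (0-1) ' ')) = true by
                      simp only [Bool.and_eq_true, beq_iff_eq]
                      rintro ⟨⟨h0, -⟩, -⟩
                      omega),
                      if_neg (show ¬ ((s[0] == s[0+1]) && (false || ((some s[0] != none) &&
                        ((s.drop (0+2)).head? != some s[0])))) = true by
                      rw [hh, hg2]
                      simp only [Bool.and_eq_true, Bool.or_eq_true, bne_iff_ne, ne_eq, Option.some.injEq]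
                      rintro ⟨-, h | ⟨-, h2'⟩⟩
                      · exact Bool.false_ne_true h
                      · exact h2' hx.symm)]
                  exact hih
                · rw [if_pos (show ((0 == 0) && (s.getD 0 ' ' == s.getD (0+1) ' ') &&
                        (s.getD 0 ' ' != s.getD (0+2) ' ')) = true by
                      rw [hgd0, hgd1, hgd2]
                      simp only [Bool.and_eq_true, beq_iff_eq, bne_iff_ne, ne_eq]
                      exact ⟨⟨by simp, hab⟩, hx⟩),
                      if_pos (show ((s[0] == s[0+1]) && (false || ((some s[0] != none) &&
                        ((s.drop (0+2)).head? != some s[0])))) = true by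
                      rw [hh, hg2]
                      simp only [Bool.and_eq_true, Bool.or_eq_true, bne_iff_ne, ne_eq, Option.some.injEq, beq_iff_eq]
                      exact ⟨hab, Or.inr ⟨by simp, fun h => hx h.symm⟩⟩)]
              · have hpm1 : i - 1 < s.length := by omega
                have hgdm : s.getD (i-1) ' ' = s[i-1] := List.getD_eq_getElem s ' ' hpm1
                have hprev : (if i = 0 then none else (s.drop (i-1)).head?) = some s[i-1] := by
                  rw [if_neg hi0, List.drop_eq_getElem_cons hpm1]; rfl
                rw [hprev]
                by_cases h2 : i + 2 < s.length
                · have hgd2 : s.getD (i+2) ' ' = s[i+2] := List.getD_eq_getElem s ' ' h2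
                  have hg2 : s[i+2]? = some s[i+2] := List.getElem?_eq_getElem h2
                  by_cases hm : s[i] ≠ s[i+2] ∧ s[i] ≠ s[i-1]
                  · rw [if_pos (show ((decide (i < s.length - 2) && decide (0 < i)) &&
                          (s.getD i ' ' == s.getD (i+1) ' ') &&
                          (s.getD i ' ' != s.getD (i+2) ' ') &&
                          (s.getD i ' ' != s.getD (i-1) ' ')) = true by
                        rw [hgd0, hgd1, hgd2, hgdm]
                        simp only [Bool.and_eq_true, decide_eq_true_eq, beq_iff_eq, bne_iff_ne, ne_eq]
                        exact ⟨⟨⟨⟨by omega, by omega⟩, hab⟩, hm.1⟩, hm.2⟩),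
                        if_pos (show ((s[i] == s[i+1]) && (false || ((some s[i] != some s[i-1]) &&
                          ((s.drop (i+2)).head? != some s[i])))) = true by
                        rw [hh, hg2]
                        simp only [Bool.and_eq_true, Bool.or_eq_true, bne_iff_ne, ne_eq, Option.some.injEq, beq_iff_eq]
                        exact ⟨hab, Or.inr ⟨hm.2, fun h => hm.1 h.symm⟩⟩)]
                  · rw [if_neg (show ¬ ((decide (i < s.length - 2) && decide (0 < i)) &&
                          (s.getD i ' ' == s.getD (i+1) ' ') &&
                          (s.getD i ' ' != s.getD (i+2) ' ') &&
                          (s.getD i ' ' != s.getD (i-1) ' ')) = true by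
                        rw [hgd0, hgd2, hgdm]
                        simp only [Bool.and_eq_true, bne_iff_ne, ne_eq]
                        rintro ⟨⟨⟨-, -⟩, h3⟩, h4⟩
                        exact hm ⟨h3, h4⟩),
                        if_neg (show ¬ ((i == 0) && (s.getD i ' ' == s.getD (i+1) ' ') &&
                          (s.getD i ' ' != s.getD (i+2) ' ')) = true by
                        simp only [Bool.and_eq_true, beq_iff_eq]
                        rintro ⟨⟨h0, -⟩, -⟩
                        exact hi0 h0),
                        if_neg (show ¬ ((i == s.length - 2) && (s.getD i ' ' == s.getD (i+1) ' ') &&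
                          (s.getD i ' ' != s.getD (i-1) ' ')) = true by
                        simp only [Bool.and_eq_true, beq_iff_eq]
                        rintro ⟨⟨h0, -⟩, -⟩
                        omega),
                        if_neg (show ¬ ((s[i] == s[i+1]) && (false || ((some s[i] != some s[i-1]) &&
                          ((s.drop (i+2)).head? != some s[i])))) = true by
                        rw [hh, hg2]
                        simp only [Bool.and_eq_true, Bool.or_eq_true, bne_iff_ne, ne_eq, Option.some.injEq, beq_iff_eq]
                        rintro ⟨-, h | ⟨hp, hq'⟩⟩
                        · exact Bool.false_ne_true h
                        · exact hm ⟨fun he => hq' he.symm, hp⟩)]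
                    exact hih
                · have heq2 : i = s.length - 2 := by omega
                  have ht : s.drop (i+2) = [] := List.drop_eq_nil_of_le (by omega)
                  by_cases hm : s[i] = s[i-1]
                  · rw [if_neg (show ¬ ((decide (i < s.length - 2) && decide (0 < i)) &&
                          (s.getD i ' ' == s.getD (i+1) ' ') &&
                          (s.getD i ' ' != s.getD (i+2) ' ') &&
                          (s.getD i ' ' != s.getD (i-1) ' ')) = true by
                        simp only [Bool.and_eq_true, decide_eq_true_eq]
                        rintro ⟨⟨⟨⟨hlt2, -⟩, -⟩, -⟩, -⟩
                        omega),
                        if_neg (show ¬ ((i == 0) && (s.getD i ' ' == s.getD (i+1) ' ') &&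
                          (s.getD i ' ' != s.getD (i+2) ' ')) = true by
                        simp only [Bool.and_eq_true, beq_iff_eq]
                        rintro ⟨⟨h0, -⟩, -⟩
                        exact hi0 h0),
                        if_neg (show ¬ ((i == s.length - 2) && (s.getD i ' ' == s.getD (i+1) ' ') &&
                          (s.getD i ' ' != s.getD (i-1) ' ')) = true by
                        rw [hgd0, hgdm]
                        simp only [Bool.and_eq_true, bne_iff_ne, ne_eq]
                        rintro ⟨-, h3⟩
                        exact h3 hm),
                        if_neg (show ¬ ((s[i] == s[i+1]) && (false || ((some s[i] != some s[i-1]) &&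
                          ((s.drop (i+2)).head? != some s[i])))) = true by
                        simp only [Bool.and_eq_true, Bool.or_eq_true, bne_iff_ne, ne_eq, Option.some.injEq]
                        rintro ⟨-, h | ⟨hp, -⟩⟩
                        · exact Bool.false_ne_true h
                        · exact hp hm)]
                    exact hih
                  · rw [if_neg (show ¬ ((decide (i < s.length - 2) && decide (0 < i)) &&
                          (s.getD i ' ' == s.getD (i+1) ' ') &&
                          (s.getD i ' ' != s.getD (i+2) ' ') &&
                          (s.getD i ' ' != s.getD (i-1) ' ')) = true by
                        simp only [Bool.and_eq_true, decide_eq_true_eq]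
                        rintro ⟨⟨⟨⟨hlt2, -⟩, -⟩, -⟩, -⟩
                        omega),
                        if_neg (show ¬ ((i == 0) && (s.getD i ' ' == s.getD (i+1) ' ') &&
                          (s.getD i ' ' != s.getD (i+2) ' ')) = true by
                        simp only [Bool.and_eq_true, beq_iff_eq]
                        rintro ⟨⟨h0, -⟩, -⟩
                        exact hi0 h0),
                        if_pos (show ((i == s.length - 2) && (s.getD i ' ' == s.getD (i+1) ' ') &&
                          (s.getD i ' ' != s.getD (i-1) ' ')) = true by
                        rw [hgd0, hgd1, hgdm]
                        simp only [Bool.and_eq_true, beq_iff_eq, bne_iff_ne, ne_eq]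
                        exact ⟨⟨by omega, hab⟩, hm⟩),
                        if_pos (show ((s[i] == s[i+1]) && (false || ((some s[i] != some s[i-1]) &&
                          ((s.drop (i+2)).head? != some s[i])))) = true by
                        rw [ht]
                        simp only [Bool.and_eq_true, Bool.or_eq_true, bne_iff_ne, ne_eq, Option.some.injEq, beq_iff_eq, List.head?_nil]
                        exact ⟨hab, Or.inr ⟨hm, by simp⟩⟩)]
        · -- no pair: both sides step to i+1
          rw [pvAGo, if_pos hlt,
              if_neg (show ¬ (decide (i < s.length - 1) && (s.getD i ' ' == s.getD (i+1) ' ')) = true by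
                rw [hgd0, hgd1]
                simp only [Bool.and_eq_true, beq_iff_eq]
                rintro ⟨-, h⟩
                exact hab h)]
          rw [hih, hdropi, hdropi1, pvAPos,
              if_neg (show ¬ ((s[i] == s[i+1]) && (allow || ((some s[i] != if i = 0 then none else (s.drop (i-1)).head?) && ((s.drop (i+2)).head? != some s[i])))) = true by
                simp only [Bool.and_eq_true, beq_iff_eq]
                rintro ⟨h, -⟩
                exact hab h)]
      · -- last position: no room for a pair
        have hsingle : s.drop (i+1) = [] := List.drop_eq_nil_of_le (by omega)
        rw [pvAGo, if_pos hlt,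
            if_neg (show ¬ (decide (i < s.length - 1) && (s.getD i ' ' == s.getD (i+1) ' ')) = true by
              simp only [Bool.and_eq_true, decide_eq_true_eq]
              rintro ⟨h, -⟩
              omega)]
        rw [ih (i+1) (by omega), hprev1, hsingle, hdropi, hsingle]
        simp [pvAPos]
    · have hle : s.length ≤ i := by omega
      rw [pvAGo, if_neg (show ¬ i < s.length by omega), List.drop_eq_nil_of_le hle]
      simp [pvAPos]

-- ===== VERDICT (by name: the statement is the Claim_ definition above) =====
theorem check_two_adjacent_are_same_spec : Claim_equal_check_two_adjacent_are_same := by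
  intro number allow _dom
  unfold Spec_check_two_adjacent_are_same check_two_adjacent_are_same check_two_adjacent_are_same_alt
  rw [pvA_eq_pos _ allow ((PySem.Int.toStr number).toList.length) 0 (by omega)]
  simp only [List.drop_zero, reduceIte]
  have hb := pvB_eq_pos allow (PySem.Int.toStr number).toList
  simp only [pvQual] at hb
  exact hb.symm
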